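-- pv_equiv track=rewrite | github.com/slidracoon72/leetcode | CheckObstacles.py | solution
-- ===== SOURCE A (Python) =====
-- def solution(operations):
--     obstacles = set()
--     res = []
--
--     for op in operations:
--         if op[0] == 1:
--             obstacles.add(op[1])
--         elif op[0] == 2:
--             x, size = op[1], op[2]
--             flag = True
--
--             for i in range(x - size, x):
--                 if i in obstacles:
--                     flag = False
--                     break
--
--             res.append("1" if flag else "0")
--
--     return ''.join(res)
-- ===== SOURCE B (Python) =====
-- def _bisect_left(a, v):
--     lo, hi = 0, len(a)
--     while lo < hi:
--         mid = (lo + hi) // 2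
--         if a[mid] < v:
--             lo = mid + 1
--         else:
--             hi = mid
--     return lo
--
--
-- def solution(operations):
--     obs = []  # sorted, duplicate-free obstacle positions
--     out = []
--     for op in operations:
--         if op[0] == 1:
--             v = op[1]
--             i = _bisect_left(obs, v)
--             if i == len(obs) or obs[i] != v:
--                 obs.insert(i, v)
--         elif op[0] == 2:
--             x, size = op[1], op[2]
--             i = _bisect_left(obs, x - size)
--             out.append("0" if i < len(obs) and obs[i] < x else "1")
--     return ''.join(out)
-- ===== Notes on version B (the rewrite author's own statement) =====
-- stated objective: alternative
-- what changed: A answers each query by scanning every integer point of the interval [x-size, x) against a hash set; B instead keeps the obstacle positions as a sorted duplicate-free list maintained by binary-search insertion and answers each query with a single binary search against the interval bounds.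
import Mathlib
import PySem

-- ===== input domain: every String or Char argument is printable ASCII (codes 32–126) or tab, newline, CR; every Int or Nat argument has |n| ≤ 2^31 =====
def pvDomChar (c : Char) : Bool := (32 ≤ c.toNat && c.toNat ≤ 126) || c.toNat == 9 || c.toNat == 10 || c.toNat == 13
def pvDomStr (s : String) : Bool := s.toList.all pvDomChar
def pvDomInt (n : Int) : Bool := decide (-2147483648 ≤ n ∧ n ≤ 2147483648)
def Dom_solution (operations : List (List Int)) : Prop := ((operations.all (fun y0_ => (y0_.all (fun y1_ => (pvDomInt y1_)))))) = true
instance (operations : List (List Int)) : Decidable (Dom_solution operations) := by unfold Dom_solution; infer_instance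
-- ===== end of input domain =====

-- B replaces A's per-query scan over the whole interval [x-size, x) (set membership per point)
-- by a sorted duplicate-free list of obstacle positions maintained with binary-search insertion
-- and queried with one binary search; objective: alternative (a different data structure and
-- query mechanism; not measured faster on the generated workload).

-- ===== PORT A =====
-- the inner 'for i in range(x-size, x): if i in obstacles: flag=False; break' loop (flag result)
def solCheckA (obstacles : PySem.Set Int) : List Int → Bool
  | [] => true
  | i :: rest => if PySem.Set.contains obstacles i then false else solCheckA obstacles rest

-- one iteration of A's 'for op in operations' loop; op[i] is exact under Pre_ (indices in range)
def solStepA (st : PySem.Set Int × List String) (op : List Int) : PySem.Set Int × List String :=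
  if PySem.List.pyGetD op 0 0 = 1 then
    (PySem.Set.add st.1 (PySem.List.pyGetD op 1 0), st.2)
  else if PySem.List.pyGetD op 0 0 = 2 then
    let x := PySem.List.pyGetD op 1 0
    let size := PySem.List.pyGetD op 2 0
    let flag := solCheckA st.1 (PySem.List.pyRange (x - size) x 1)
    (st.1, st.2 ++ [if flag then "1" else "0"])
  else st

def solution (operations : List (List Int)) : String :=
  PySem.Str.join "" (operations.foldl solStepA (PySem.Set.empty, [])).2

-- ===== PORT B =====
-- _bisect_left's 'while lo < hi' loop: recursion on the interval length (hi - lo).toNat, which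
-- strictly decreases each iteration; the real loop condition lo < hi is re-checked every step,
-- so with this fuel the recursion computes exactly the Python loop. a[mid] is exact at call
-- sites (0 <= lo <= hi <= len a).
def solBisectGo (a : List Int) (v : Int) : Nat → Int → Int → Int
  | 0, lo, _ => lo
  | n + 1, lo, hi =>
    if lo < hi then
      let mid := PySem.Int.floordiv (lo + hi) 2
      if PySem.List.pyGetD a mid 0 < v then solBisectGo a v n (mid + 1) hi
      else solBisectGo a v n lo mid
    else lo

def solBisect (a : List Int) (v : Int) (lo hi : Int) : Int :=
  solBisectGo a v (hi - lo).toNat lo hi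

-- one iteration of B's 'for op in operations' loop
def solStepB (st : List Int × List String) (op : List Int) : List Int × List String :=
  if PySem.List.pyGetD op 0 0 = 1 then
    let v := PySem.List.pyGetD op 1 0
    let i := solBisect st.1 v 0 (st.1.length : Int)
    if i = (st.1.length : Int) ∨ PySem.List.pyGetD st.1 i 0 ≠ v then
      (PySem.List.insert st.1 i v, st.2)
    else st
  else if PySem.List.pyGetD op 0 0 = 2 then
    let x := PySem.List.pyGetD op 1 0
    let size := PySem.List.pyGetD op 2 0
    let i := solBisect st.1 (x - size) 0 (st.1.length : Int)
    (st.1, st.2 ++ [if i < (st.1.length : Int) ∧ PySem.List.pyGetD st.1 i 0 < x then "0" else "1"])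
  else st

def solution_alt (operations : List (List Int)) : String :=
  PySem.Str.join "" (operations.foldl solStepB ([], [])).2

-- ===== PRECONDITION & SPEC =====
-- Pre_ excludes exactly the inputs on which Python A raises IndexError: an empty operation,
-- a type-1 operation shorter than 2, or a type-2 operation shorter than 3.
def Pre_solution (operations : List (List Int)) : Prop :=
  ∀ op ∈ operations, op ≠ [] ∧ (op.getD 0 0 = 1 → 2 ≤ op.length) ∧ (op.getD 0 0 = 2 → 3 ≤ op.length)
instance (operations : List (List Int)) : Decidable (Pre_solution operations) := by
  unfold Pre_solution; infer_instance

def pvWitness_solution : List (List Int) := [[1, 5], [2, 6, 2], [1, 4], [2, 6, 2], [2, 4, 3]]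

def Spec_solution (operations : List (List Int)) (out : String) : Prop := out = solution_alt operations
instance (operations : List (List Int)) (out : String) : Decidable (Spec_solution operations out) := by
  unfold Spec_solution; infer_instance

-- ===== CLAIM (what is proved, stated in full; the proofs are below) =====
def Claim_equal_solution : Prop := ∀ (operations : List (List Int)), Dom_solution operations → Pre_solution operations → Spec_solution operations (solution operations)

-- ===== LEMMAS AND PROOFS =====

-- simulation invariant: B's list is strictly sorted and has the same members as A's set
def solInv (S : PySem.Set Int) (obs : List Int) : Prop :=
  obs.Pairwise (· < ·) ∧ (∀ t : Int, PySem.Set.contains S t = true ↔ t ∈ obs)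

lemma solCheckA_eq_false (S : PySem.Set Int) (l : List Int) :
    solCheckA S l = false ↔ ∃ i ∈ l, PySem.Set.contains S i = true := by
  induction l with
  | nil => simp [solCheckA]
  | cons a l ih =>
    simp only [solCheckA]
    by_cases h : PySem.Set.contains S a = true
    · rw [if_pos h]
      exact ⟨fun _ => ⟨a, by simp, h⟩, fun _ => rfl⟩
    · rw [if_neg h, ih]
      constructor
      · rintro ⟨i, hi, hc⟩; exact ⟨i, List.mem_cons_of_mem _ hi, hc⟩
      · rintro ⟨i, hi, hc⟩
        rcases List.mem_cons.mp hi with h' | h'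
        · exact absurd (h' ▸ hc) h
        · exact ⟨i, h', hc⟩

-- strict sortedness gives monotone access
lemma solMono (a : List Int) (hp : a.Pairwise (· < ·)) (i j : Nat)
    (hi : i < a.length) (hj : j < a.length) (hij : i ≤ j) : a[i] ≤ a[j] := by
  rcases Nat.lt_or_ge i j with h | h
  · exact le_of_lt ((List.pairwise_iff_getElem.mp hp) i j hi hj h)
  · have : i = j := by omega
    subst this; exact le_refl _

lemma solBisect_spec_aux (a : List Int) (hp : a.Pairwise (· < ·)) (v : Int) :
    ∀ n : Nat, ∀ lo hi : Int, (hi - lo).toNat ≤ n → 0 ≤ lo → lo ≤ hi → hi ≤ (a.length : Int) →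
    (∀ k (hk : k < a.length), (k : Int) < lo → a[k] < v) →
    (∀ k (hk : k < a.length), hi ≤ (k : Int) → v ≤ a[k]) →
    lo ≤ solBisectGo a v n lo hi ∧ solBisectGo a v n lo hi ≤ hi ∧
      (∀ k (hk : k < a.length),
        ((k : Int) < solBisectGo a v n lo hi → a[k] < v) ∧
        (solBisectGo a v n lo hi ≤ (k : Int) → v ≤ a[k])) := by
  have hs := List.pairwise_iff_getElem.mp hp
  intro n
  induction n with
  | zero =>
    intro lo hi hn h0 hle hlen hb ha
    simp only [solBisectGo]
    exact ⟨le_refl _, hle, fun k hk => ⟨hb k hk, fun hge => ha k hk (by omega)⟩⟩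
  | succ n ih =>
    intro lo hi hn h0 hle hlen hb ha
    simp only [solBisectGo]
    by_cases hlt : lo < hi
    · rw [if_pos hlt]
      have hmb := PySem.Int.floordiv_two_mid_bounds (lo := lo) (hi := hi) hle
      have hmlt : PySem.Int.floordiv (lo + hi) 2 < hi :=
        (PySem.Int.floordiv_lt_iff_lt_mul (by omega)).mpr (by omega)
      set mid := PySem.Int.floordiv (lo + hi) 2 with hmdef
      have hmid0 : 0 ≤ mid := by omega
      have hmidlen : mid < (a.length : Int) := by omega
      have hmidlen' : mid.toNat < a.length := by omega
      have hget : PySem.List.pyGetD a mid 0 = a[mid.toNat] :=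
        PySem.List.pyGetD_eq_getElem (xs := a) (i := mid) (d := 0) hmid0 hmidlen
      simp only [hget]
      by_cases hc : a[mid.toNat] < v
      · rw [if_pos hc]
        have hres := ih (mid + 1) hi (by omega) (by omega) (by omega) hlen
          (fun k hk hklt => by
            rcases Nat.lt_or_ge k mid.toNat with h' | h'
            · exact lt_of_lt_of_le (hs k mid.toNat hk hmidlen' h') (le_of_lt hc)
            · have : k = mid.toNat := by omega
              subst this; exact hc)
          ha
        exact ⟨by omega, hres.2.1, hres.2.2⟩
      · rw [if_neg hc]
        push_neg at hc
        have hres := ih lo mid (by omega) h0 (by omega) (by omega) hb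
          (fun k hk hkge => le_trans hc (solMono a hp mid.toNat k hmidlen' hk (by omega)))
        exact ⟨hres.1, by omega, hres.2.2⟩
    · rw [if_neg hlt]
      exact ⟨le_refl _, hle, fun k hk => ⟨hb k hk, fun hge => ha k hk (by omega)⟩⟩

-- the two binary searches are always called with lo = 0, hi = len
lemma solBisect_spec (a : List Int) (hp : a.Pairwise (· < ·)) (v : Int) :
    0 ≤ solBisect a v 0 (a.length : Int) ∧ solBisect a v 0 (a.length : Int) ≤ (a.length : Int) ∧
      (∀ k (hk : k < a.length),
        ((k : Int) < solBisect a v 0 (a.length : Int) → a[k] < v) ∧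
        (solBisect a v 0 (a.length : Int) ≤ (k : Int) → v ≤ a[k])) :=
  solBisect_spec_aux a hp v ((a.length : Int) - 0).toNat 0 (a.length : Int) (by omega) (by omega)
    (by omega) (by omega) (fun k hk h => by omega) (fun k hk h => by omega)

lemma solStep_sim (S : PySem.Set Int) (obs : List Int) (res : List String) (op : List Int)
    (h : solInv S obs) :
    solInv (solStepA (S, res) op).1 (solStepB (obs, res) op).1 ∧
      (solStepA (S, res) op).2 = (solStepB (obs, res) op).2 := by
  obtain ⟨hp, hm⟩ := h
  have hmemS : ∀ u : Int, u ∈ S ↔ u ∈ obs := fun u => Iff.trans (PySem.Set.contains_iff ..).symm (hm u)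
  unfold solStepA solStepB
  by_cases h1 : PySem.List.pyGetD op 0 0 = 1
  · rw [if_pos h1, if_pos h1]
    dsimp only
    set v := PySem.List.pyGetD op 1 0 with hv
    obtain ⟨hr0, hrlen, hprop⟩ := solBisect_spec obs hp v
    set r := solBisect obs v 0 (obs.length : Int) with hrdef
    by_cases hcond : r = (obs.length : Int) ∨ PySem.List.pyGetD obs r 0 ≠ v
    · rw [if_pos hcond]
      have hrle : r.toNat ≤ obs.length := by omega
      have hins : PySem.List.insert obs r v =
          obs.take r.toNat ++ v :: obs.drop r.toNat := by
        have he : r = ((r.toNat : Nat) : Int) := (Int.toNat_of_nonneg hr0).symm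
        rw [he, PySem.List.insert_natCast obs r.toNat v hrle]
        simp
        have hmax : (max r 0).toNat = r.toNat := by omega
        rw [hmax]
      have hbelow : ∀ k (hk : k < obs.length), k < r.toNat → obs[k] < v :=
        fun k hk hkr => (hprop k hk).1 (by omega)
      have habove : ∀ k (hk : k < obs.length), r.toNat ≤ k → v ≤ obs[k] :=
        fun k hk hkr => (hprop k hk).2 (by omega)
      have hstrict : ∀ k (hk : k < obs.length), r.toNat ≤ k → v < obs[k] := by
        intro k hk hkr
        rcases hcond with hc | hc
        · omega
        · have hrltlen : r < (obs.length : Int) := by omega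
          have hgetr : PySem.List.pyGetD obs r 0 = obs[r.toNat]'(by omega) :=
            PySem.List.pyGetD_eq_getElem (xs := obs) (i := r) (d := 0) hr0 hrltlen
          have hne : obs[r.toNat]'(by omega) ≠ v := by rw [← hgetr]; exact hc
          have hge : v ≤ obs[r.toNat]'(by omega) := habove r.toNat (by omega) le_rfl
          exact lt_of_lt_of_le (lt_of_le_of_ne hge (Ne.symm hne))
            (solMono obs hp r.toNat k (by omega) hk hkr)
      have hmem_take : ∀ t, t ∈ obs.take r.toNat → t < v := by
        intro t ht
        obtain ⟨i, hi, hieq⟩ := List.mem_iff_getElem.mp ht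
        have hi' : i < r.toNat := by simp [List.length_take] at hi; omega
        have hilen : i < obs.length := by simp [List.length_take] at hi; omega
        have hgt : (obs.take r.toNat)[i]'hi = obs[i]'hilen := List.getElem_take ..
        rw [hgt] at hieq
        exact hieq ▸ hbelow i hilen hi'
      have hmem_drop : ∀ t, t ∈ obs.drop r.toNat → v < t := by
        intro t ht
        obtain ⟨i, hi, hieq⟩ := List.mem_iff_getElem.mp ht
        have hlen2 : r.toNat + i < obs.length := by simp [List.length_drop] at hi; omega
        have hgd : (obs.drop r.toNat)[i]'hi = obs[r.toNat + i]'hlen2 := List.getElem_drop ..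
        rw [hgd] at hieq
        exact hieq ▸ hstrict (r.toNat + i) hlen2 (by omega)
      have hp' : (obs.take r.toNat ++ v :: obs.drop r.toNat).Pairwise (· < ·) := by
        rw [List.pairwise_append]
        refine ⟨List.Pairwise.sublist (List.take_sublist _ _) hp, ?_, ?_⟩
        · rw [List.pairwise_cons]
          exact ⟨fun b hb => hmem_drop b hb, List.Pairwise.sublist (List.drop_sublist _ _) hp⟩
        · intro a ha b hb
          rcases List.mem_cons.mp hb with hb | hb
          · exact hb ▸ hmem_take a ha
          · exact lt_trans (hmem_take a ha) (hmem_drop b hb)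
      have hsplit : ∀ t : Int,
          t ∈ obs.take r.toNat ++ v :: obs.drop r.toNat ↔ t = v ∨ t ∈ obs := by
        intro t
        conv_rhs => rw [← List.take_append_drop r.toNat obs]
        simp only [List.mem_append, List.mem_cons]
        tauto
      rw [hins]
      refine ⟨⟨hp', ?_⟩, rfl⟩
      intro t
      rw [PySem.Set.contains_iff, PySem.Set.mem_add, hsplit, hmemS t]
      tauto
    · rw [if_neg hcond]
      rw [not_or, not_not] at hcond
      obtain ⟨hrne, hreq⟩ := hcond
      have hrlt : r.toNat < obs.length := by omega
      have hgetr : PySem.List.pyGetD obs r 0 = obs[r.toNat]'hrlt :=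
        PySem.List.pyGetD_eq_getElem (xs := obs) (i := r) (d := 0) hr0 (by omega)
      have hvmem : v ∈ obs :=
        List.mem_iff_getElem.mpr ⟨r.toNat, hrlt, by rw [← hgetr]; exact hreq⟩
      refine ⟨⟨hp, ?_⟩, rfl⟩
      intro t
      rw [PySem.Set.contains_iff, PySem.Set.mem_add]
      constructor
      · rintro (ht | rfl)
        · exact (hmemS t).mp ht
        · exact hvmem
      · exact fun ht => Or.inl ((hmemS t).mpr ht)
  · by_cases h2 : PySem.List.pyGetD op 0 0 = 2
    · rw [if_neg h1, if_neg h1, if_pos h2, if_pos h2]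
      dsimp only
      set x := PySem.List.pyGetD op 1 0 with hx
      set size := PySem.List.pyGetD op 2 0 with hsize
      obtain ⟨hr0, hrlen, hprop⟩ := solBisect_spec obs hp (x - size)
      set r := solBisect obs (x - size) 0 (obs.length : Int) with hrdef
      refine ⟨⟨hp, hm⟩, ?_⟩
      have key : solCheckA S (PySem.List.pyRange (x - size) x 1) = false ↔
          (r < (obs.length : Int) ∧ PySem.List.pyGetD obs r 0 < x) := by
        rw [solCheckA_eq_false]
        constructor
        · rintro ⟨i, hi, hci⟩
          obtain ⟨hil, hiu⟩ := (PySem.List.mem_pyRange_one).mp hi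
          obtain ⟨k, hk, hkeq⟩ := List.mem_iff_getElem.mp ((hm i).mp hci)
          have hkr : r ≤ (k : Int) := by
            by_contra hlt2
            have := (hprop k hk).1 (by omega)
            omega
          have hrltlen : r < (obs.length : Int) := by omega
          have hrlt : r.toNat < obs.length := by omega
          have hgetr : PySem.List.pyGetD obs r 0 = obs[r.toNat]'hrlt :=
            PySem.List.pyGetD_eq_getElem (xs := obs) (i := r) (d := 0) hr0 hrltlen
          refine ⟨hrltlen, ?_⟩
          rw [hgetr]
          have hmono : obs[r.toNat]'hrlt ≤ obs[k] := solMono obs hp r.toNat k hrlt hk (by omega)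
          omega
        · rintro ⟨hrlt, hless⟩
          have hrlt' : r.toNat < obs.length := by omega
          have hgetr : PySem.List.pyGetD obs r 0 = obs[r.toNat]'hrlt' :=
            PySem.List.pyGetD_eq_getElem (xs := obs) (i := r) (d := 0) hr0 hrlt
          refine ⟨obs[r.toNat]'hrlt', ?_, (hm _).mpr (List.mem_iff_getElem.mpr ⟨r.toNat, hrlt', rfl⟩)⟩
          rw [PySem.List.mem_pyRange_one]
          refine ⟨(hprop r.toNat hrlt').2 (by omega), ?_⟩
          rw [hgetr] at hless; exact hless
      congr 1
      cases hb : solCheckA S (PySem.List.pyRange (x - size) x 1) with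
      | false =>
        rw [if_pos (key.mp hb)]
        simp
      | true =>
        have hnc : ¬ (r < (obs.length : Int) ∧ PySem.List.pyGetD obs r 0 < x) := by
          intro hc
          rw [key.mpr hc] at hb
          exact Bool.false_ne_true hb
        rw [if_neg hnc]
        simp
    · rw [if_neg h1, if_neg h1, if_neg h2, if_neg h2]
      exact ⟨⟨hp, hm⟩, rfl⟩

lemma solFold_sim (ops : List (List Int)) :
    ∀ (S : PySem.Set Int) (obs : List Int) (res : List String), solInv S obs →
    solInv (ops.foldl solStepA (S, res)).1 (ops.foldl solStepB (obs, res)).1 ∧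
      (ops.foldl solStepA (S, res)).2 = (ops.foldl solStepB (obs, res)).2 := by
  induction ops with
  | nil => intro S obs res h; exact ⟨h, rfl⟩
  | cons op ops ih =>
    intro S obs res h
    obtain ⟨h1, h2⟩ := solStep_sim S obs res op h
    simp only [List.foldl_cons]
    have eA : solStepA (S, res) op = ((solStepA (S, res) op).1, (solStepA (S, res) op).2) := rfl
    have eB : solStepB (obs, res) op = ((solStepB (obs, res) op).1, (solStepB (obs, res) op).2) := rfl
    rw [eA, eB, h2]
    exact ih _ _ _ h1

-- ===== VERDICT (by name: the statement is the Claim_ definition above) =====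
theorem solution_spec : Claim_equal_solution := by
  intro operations _ _
  unfold Spec_solution solution solution_alt
  have h := solFold_sim operations PySem.Set.empty [] []
    ⟨List.Pairwise.nil, fun t => by rw [PySem.Set.contains_iff]; exact Iff.rfl⟩
  rw [h.2]
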